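-- pv_equiv track=rewrite | github.com/sheucm/leetcode-algorithm | 00213_DP__House_Robber_II/sol.py | _robber1_solution
-- ===== SOURCE A (Python) =====
-- from typing import List
--
-- def _robber1_solution(nums: List[int]) -> int:
--     DP = [0] * (len(nums) + 2)
--     DP[-1] = 0
--     DP[-2] = 0
--     for i in range(len(nums)-1, -1, -1):
--         DP[i] = max(
--             nums[i] + DP[i+2],
--             DP[i+1]
--         )
--     return DP[0]
-- ===== SOURCE B (Python) =====
-- from typing import List
--
-- def _robber1_solution(nums: List[int]) -> int:
--     # Divide and conquer with an associative segment combine: each segment is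
--     # summarized by a 2x2 table g[i][j] = best non-adjacent sum in the segment
--     # when the first element may be picked only if i, the last only if j.
--     def solve(seg):
--         n = len(seg)
--         if n == 0:
--             return (0, 0, 0, 0)
--         if n == 1:
--             return (0, 0, 0, max(seg[0], 0))
--         m = n // 2
--         L00, L01, L10, L11 = solve(seg[:m])
--         R00, R01, R10, R11 = solve(seg[m:])
--         # adjacent boundary: never pick both L's last and R's first
--         return (max(L00 + R10, L01 + R00),
--                 max(L00 + R11, L01 + R01),
--                 max(L10 + R10, L11 + R00),
--                 max(L10 + R11, L11 + R01))
--     return solve(nums)[3]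
-- ===== Notes on version B (the rewrite author's own statement) =====
-- stated objective: alternative
-- what changed: Replaces A's backward-filled length-n+2 DP array with a recursive divide-and-conquer that summarizes each half as a 2x2 table (first/last element usable flags) and merges the halves with an associative combine forbidding the adjacent boundary pair.
import Mathlib
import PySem

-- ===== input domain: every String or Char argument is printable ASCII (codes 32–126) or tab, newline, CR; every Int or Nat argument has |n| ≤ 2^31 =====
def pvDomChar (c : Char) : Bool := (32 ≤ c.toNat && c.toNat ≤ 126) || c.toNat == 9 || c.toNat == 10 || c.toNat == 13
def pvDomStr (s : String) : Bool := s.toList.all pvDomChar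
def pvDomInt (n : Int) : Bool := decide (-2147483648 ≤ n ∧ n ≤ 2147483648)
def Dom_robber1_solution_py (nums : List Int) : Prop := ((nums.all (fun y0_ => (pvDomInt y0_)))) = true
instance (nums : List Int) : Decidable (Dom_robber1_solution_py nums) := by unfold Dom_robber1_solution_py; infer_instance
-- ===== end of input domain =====

-- B replaces A's backward-filled DP array with a divide-and-conquer that merges
-- 2x2 per-segment summaries (alternative algorithm, same asymptotic cost).

-- ===== PORT A =====
-- Literal port of A: build DP of length len(nums)+2, set DP[-1] and DP[-2] to 0,
-- fill backwards with for i in range(len(nums)-1, -1, -1), return DP[0].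
-- All list reads/writes in the loop are in range, so pyGetD/pySetD are exact here.
def robber1_solution_py (nums : List Int) : Int :=
  let DP : List Int := List.replicate (nums.length + 2) 0
  let DP := PySem.List.pySetD DP (-1) 0
  let DP := PySem.List.pySetD DP (-2) 0
  let DP := (PySem.List.pyRange ((nums.length : Int) - 1) (-1) (-1)).foldl
    (fun DP i => PySem.List.pySetD DP i
        (max (PySem.List.pyGetD nums i 0 + PySem.List.pyGetD DP (i + 2) 0)
             (PySem.List.pyGetD DP (i + 1) 0))) DP
  PySem.List.pyGetD DP 0 0

-- ===== PORT B =====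
-- Literal port of B's inner `solve`: a segment is summarized by the 4-tuple
-- (g00, g01, g10, g11); recursion splits at m = n // 2 (seg[:m] / seg[m:]).
def pvSolve (seg : List Int) : Int × Int × Int × Int :=
  match seg with
  | [] => (0, 0, 0, 0)
  | [x] => (0, 0, 0, max x 0)
  | a :: b :: t =>
    let m := (t.length + 2) / 2
    let L := pvSolve ((a :: b :: t).take m)
    let R := pvSolve ((a :: b :: t).drop m)
    (max (L.1 + R.2.2.1) (L.2.1 + R.1),
     max (L.1 + R.2.2.2) (L.2.1 + R.2.1),
     max (L.2.2.1 + R.2.2.1) (L.2.2.2 + R.1),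
     max (L.2.2.1 + R.2.2.2) (L.2.2.2 + R.2.1))
termination_by seg.length
decreasing_by
  · simp only [List.length_take, List.length_cons]; omega
  · simp only [List.length_drop, List.length_cons]; omega

def robber1_solution_py_alt (nums : List Int) : Int :=
  (pvSolve nums).2.2.2

-- ===== PRECONDITION & SPEC =====
def Spec_robber1_solution_py (nums : List Int) (out : Int) : Prop := out = robber1_solution_py_alt nums
instance (nums : List Int) (out : Int) : Decidable (Spec_robber1_solution_py nums out) := by unfold Spec_robber1_solution_py; infer_instance

-- ===== CLAIM (what is proved, stated in full; the proofs are below) =====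
def Claim_equal_robber1_solution_py : Prop := ∀ (nums : List Int), Dom_robber1_solution_py nums → Spec_robber1_solution_py nums (robber1_solution_py nums)

-- ===== LEMMAS AND PROOFS =====

-- Reference value: maximum sum of non-adjacent elements (empty selection allowed).
def pvRob : List Int → Int
  | [] => 0
  | [x] => max x 0
  | x :: y :: t => max (x + pvRob t) (pvRob (y :: t))

lemma pvRob_cons (x : Int) (t : List Int) :
    pvRob (x :: t) = max (x + pvRob (t.drop 1)) (pvRob t) := by
  cases t with
  | nil => simp [pvRob]
  | cons y t => simp [pvRob]

lemma dropLast_drop_one (b : Int) (t : List Int) :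
    ((b :: t).dropLast).drop 1 = t.dropLast := by
  cases t <;> simp

lemma drop_one_dropLast (l : List Int) :
    (l.drop 1).dropLast = (l.dropLast).drop 1 := by
  cases l with
  | nil => simp
  | cons b t => rw [dropLast_drop_one]; simp

lemma pvRob_drop_le (l : List Int) : pvRob (l.drop 1) ≤ pvRob l := by
  cases l with
  | nil => simp
  | cons x t => rw [pvRob_cons]; simp

-- The key split identity: at any cut, either L's last is forbidden or R's first is.
lemma pvRob_split (L R : List Int) :
    pvRob (L ++ R) = max (pvRob L.dropLast + pvRob R) (pvRob L + pvRob (R.drop 1)) := by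
  induction L using pvRob.induct with
  | case1 =>
      have := pvRob_drop_le R
      show pvRob R = max (pvRob (List.dropLast []) + pvRob R) (pvRob [] + pvRob (R.drop 1))
      show pvRob R = max (0 + pvRob R) (0 + pvRob (R.drop 1))
      omega
  | case2 a =>
      have hd := pvRob_drop_le R
      show pvRob (a :: R) = max (pvRob (List.dropLast [a]) + pvRob R) (pvRob [a] + pvRob (R.drop 1))
      rw [pvRob_cons]
      show max (a + pvRob (R.drop 1)) (pvRob R) = max (0 + pvRob R) (max a 0 + pvRob (R.drop 1))
      omega
  | case3 a b t ih1 ih2 =>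
      have h1 : pvRob ((a :: b :: t) ++ R) = max (a + pvRob (t ++ R)) (pvRob ((b :: t) ++ R)) := rfl
      have h2 : (a :: b :: t).dropLast = a :: (b :: t).dropLast := by simp
      have h3 : pvRob (a :: (b :: t).dropLast) =
          max (a + pvRob (t.dropLast)) (pvRob ((b :: t).dropLast)) := by
        rw [pvRob_cons a ((b :: t).dropLast), dropLast_drop_one]
      have h4 : pvRob (a :: b :: t) = max (a + pvRob t) (pvRob (b :: t)) := rfl
      rw [h1, ih1, ih2, h2, h3, h4]
      omega

def pvQuad (l : List Int) : Int × Int × Int × Int :=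
  (pvRob ((l.drop 1).dropLast), pvRob (l.drop 1), pvRob l.dropLast, pvRob l)

lemma drop_one_append (L R : List Int) (h : L ≠ []) :
    (L ++ R).drop 1 = L.drop 1 ++ R := by
  cases L with
  | nil => exact absurd rfl h
  | cons a t => simp

lemma pvQuad_combine (L R : List Int) (hL : L ≠ []) (hR : R ≠ []) :
    pvQuad (L ++ R) =
      (max ((pvQuad L).1 + (pvQuad R).2.2.1) ((pvQuad L).2.1 + (pvQuad R).1),
       max ((pvQuad L).1 + (pvQuad R).2.2.2) ((pvQuad L).2.1 + (pvQuad R).2.1),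
       max ((pvQuad L).2.2.1 + (pvQuad R).2.2.1) ((pvQuad L).2.2.2 + (pvQuad R).1),
       max ((pvQuad L).2.2.1 + (pvQuad R).2.2.2) ((pvQuad L).2.2.2 + (pvQuad R).2.1)) := by
  have hdl : (L ++ R).dropLast = L ++ R.dropLast := List.dropLast_append_of_ne_nil hR
  have hd1 : (L ++ R).drop 1 = L.drop 1 ++ R := drop_one_append L R hL
  have hdd : (L.drop 1 ++ R).dropLast = L.drop 1 ++ R.dropLast := List.dropLast_append_of_ne_nil hR
  unfold pvQuad
  simp only [hdl, hd1, hdd, pvRob_split, drop_one_dropLast]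

lemma pvSolve_eq_pvQuad (l : List Int) : pvSolve l = pvQuad l := by
  induction l using pvSolve.induct with
  | case1 => simp [pvSolve, pvQuad, pvRob]
  | case2 x => simp [pvSolve, pvQuad, pvRob]
  | case3 a b t m ih1 ih2 =>
      have hm : m = (t.length + 2) / 2 := rfl
      rw [hm] at ih1 ih2
      have hsplit : (a :: b :: t).take ((t.length + 2) / 2) ++ (a :: b :: t).drop ((t.length + 2) / 2)
          = a :: b :: t := List.take_append_drop _ _
      have hLne : (a :: b :: t).take ((t.length + 2) / 2) ≠ [] := by
        intro h
        have := congrArg List.length h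
        simp only [List.length_take, List.length_cons, List.length_nil] at this
        omega
      have hRne : (a :: b :: t).drop ((t.length + 2) / 2) ≠ [] := by
        intro h
        have := congrArg List.length h
        simp only [List.length_drop, List.length_cons, List.length_nil] at this
        omega
      rw [pvSolve]
      simp only [ih1, ih2]
      rw [← pvQuad_combine _ _ hLne hRne, hsplit]

lemma alt_eq_pvRob (nums : List Int) : robber1_solution_py_alt nums = pvRob nums := by
  unfold robber1_solution_py_alt
  rw [pvSolve_eq_pvQuad]
  rfl

-- A's loop body at index k writes pvRob (nums.drop k), given the invariant above k.
lemma loopA (nums : List Int) : ∀ (k : Nat) (DP : List Int),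
    DP.length = nums.length + 2 → k ≤ nums.length →
    (∀ j : Nat, k ≤ j → PySem.List.pyGetD DP (j : Int) 0 = pvRob (nums.drop j)) →
    ∀ j : Nat,
      PySem.List.pyGetD
        ((PySem.List.pyRange ((k : Int) - 1) (-1) (-1)).foldl
          (fun DP i => PySem.List.pySetD DP i
              (max (PySem.List.pyGetD nums i 0 + PySem.List.pyGetD DP (i + 2) 0)
                   (PySem.List.pyGetD DP (i + 1) 0))) DP) (j : Int) 0
      = pvRob (nums.drop j) := by
  intro k
  induction k with
  | zero =>
      intro DP hlen _ hinv j
      rw [PySem.List.pyRange_neg_one_eq_nil (by norm_num)]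
      exact hinv j (Nat.zero_le j)
  | succ k ih =>
      intro DP hlen hk hinv j
      have hkn : k < nums.length := hk
      have hstart : (((k + 1 : Nat) : Int) - 1) = ((k : Nat) : Int) := by push_cast; ring
      rw [hstart, PySem.List.pyRange_neg_one_cons (by omega), List.foldl_cons]
      have hval : max (PySem.List.pyGetD nums ((k : Nat) : Int) 0 +
              PySem.List.pyGetD DP (((k : Nat) : Int) + 2) 0)
            (PySem.List.pyGetD DP (((k : Nat) : Int) + 1) 0) = pvRob (nums.drop k) := by
        have e2 : ((k : Nat) : Int) + 2 = (((k + 2 : Nat)) : Int) := by push_cast; ring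
        have e1 : ((k : Nat) : Int) + 1 = (((k + 1 : Nat)) : Int) := by push_cast; ring
        rw [e1, e2, hinv (k + 2) (by omega), hinv (k + 1) (by omega),
          PySem.List.pyGetD_natCast, List.getD_eq_getElem _ _ hkn]
        have hd : nums.drop k = nums[k] :: nums.drop (k + 1) := List.drop_eq_getElem_cons hkn
        have hdd : List.drop 1 (nums.drop (k + 1)) = nums.drop (k + 2) := by
          rw [List.drop_drop]
        rw [hd, pvRob_cons, hdd]
      rw [hval]
      refine ih (PySem.List.pySetD DP ((k : Nat) : Int) (pvRob (nums.drop k))) ?_ (by omega) ?_ j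
      · rw [PySem.List.length_pySetD]; exact hlen
      · intro j' hj'
        rw [PySem.List.pyGetD_pySetD_natCast _ _ _ _ _ (by omega)]
        by_cases hjk : j' = k
        · simp [hjk]
        · rw [if_neg hjk]
          exact hinv j' (by omega)

lemma initDP_eq (m : Nat) (i : Int) :
    PySem.List.pySetD (List.replicate m (0 : Int)) i 0 = List.replicate m 0 := by
  cases h : PySem.List.pyIdx? m i with
  | none => simp [PySem.List.pySetD, PySem.List.pySet?, List.length_replicate, h]
  | some k => simp [PySem.List.pySetD, PySem.List.pySet?, List.length_replicate, h,
      List.set_replicate_self]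

-- ===== VERDICT (by name: the statement is the Claim_ definition above) =====
theorem robber1_solution_py_spec : Claim_equal_robber1_solution_py := by
  intro nums _
  unfold Spec_robber1_solution_py
  rw [alt_eq_pvRob]
  simp only [robber1_solution_py, initDP_eq]
  have h0 : (0 : Int) = ((0 : Nat) : Int) := rfl
  have hstart : ((nums.length : Int) - 1) = (((nums.length : Nat) : Int) - 1) := rfl
  rw [h0, hstart]
  refine loopA nums nums.length (List.replicate (nums.length + 2) 0) (by simp) (le_refl _) ?_ 0
  intro j hj
  rw [List.drop_eq_nil_of_le (by omega)]
  have : PySem.List.pyGetD (List.replicate (nums.length + 2) (0 : Int)) ((j : Nat) : Int) 0 = 0 := by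
    rw [PySem.List.pyGetD_natCast]
    by_cases h : j < nums.length + 2
    · exact List.getD_replicate 0 h
    · rw [List.getD_eq_default _ _ (by simp; omega)]
  rw [this]; rfl
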